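-- pv_equiv track=rewrite | github.com/calblueprint/revolv | revolv/payments/utils.py | clean_project_name
-- ===== SOURCE A (Python) =====
-- def clean_project_name(name):
--     """
--     A helper function that cleans a project name to make it JQuery
--     friendly for use in the Accounting page. This is because the project name
--     is included as part of the class name for the selector buttons.
--     The function removes all characters that are not a-z or A-Z and replaces them
--     with a 'z'.
--
--     :args:
--         name: A string to be cleaned
--
--     :return:
--         Returns a cleaned up version of name.
--     """
--     new_name = ""
--     for c in name:
--         value = ord(c)
--         if value < 65 or value > 122:
--             new_name += 'z'
--         else:
--             new_name += c
--     return new_name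
-- ===== SOURCE B (Python) =====
-- import re
--
-- def clean_project_name(name):
--     # Single regex substitution: [^\x41-\x7a] matches exactly the chars with
--     # ord < 65 or ord > 122, each replaced by 'z'.
--     return re.sub(r'[^\x41-\x7a]', 'z', name)
-- ===== Notes on version B (the rewrite author's own statement) =====
-- stated objective: idiomatic
-- what changed: Replaces the explicit character loop with repeated string concatenation by a single regex substitution over the complement character class [^\x41-\x7a].
import Mathlib
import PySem

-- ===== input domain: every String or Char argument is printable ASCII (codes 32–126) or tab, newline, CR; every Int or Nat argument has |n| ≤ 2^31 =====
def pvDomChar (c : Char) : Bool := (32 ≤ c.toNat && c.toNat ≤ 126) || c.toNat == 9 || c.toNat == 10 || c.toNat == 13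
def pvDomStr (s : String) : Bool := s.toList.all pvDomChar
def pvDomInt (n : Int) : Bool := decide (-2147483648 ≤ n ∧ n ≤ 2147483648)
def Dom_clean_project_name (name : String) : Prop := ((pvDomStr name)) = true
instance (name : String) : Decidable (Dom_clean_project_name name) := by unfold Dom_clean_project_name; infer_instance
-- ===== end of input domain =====

-- ===== PORT A =====
-- B replaces A's per-character loop (with string concatenation) by one regex substitution; same return value.
def clean_project_name (name : String) : String :=
  String.mk (name.toList.foldl
    (fun new_name c =>
      if c.toNat < 65 ∨ c.toNat > 122 then new_name ++ ['z'] else new_name ++ [c]) [])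

-- ===== PORT B =====
-- re.sub(r'[^\x41-\x7a]', 'z', name): the pattern is a single-character class, so the
-- substitution is exactly a per-character replacement — ported as a map over the characters.
def clean_project_name_alt (name : String) : String :=
  String.mk (name.toList.map (fun c => if 65 ≤ c.toNat && c.toNat ≤ 122 then c else 'z'))

-- ===== PRECONDITION & SPEC =====
def Spec_clean_project_name (name : String) (out : String) : Prop := out = clean_project_name_alt name
instance (name : String) (out : String) : Decidable (Spec_clean_project_name name out) := by unfold Spec_clean_project_name; infer_instance

-- ===== CLAIM (what is proved, stated in full; the proofs are below) =====
def Claim_equal_clean_project_name : Prop := ∀ (name : String), Dom_clean_project_name name → Spec_clean_project_name name (clean_project_name name)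

-- ===== LEMMAS AND PROOFS =====
theorem clean_pointwise (c : Char) :
    (if c.toNat < 65 ∨ c.toNat > 122 then (['z'] : List Char) else [c])
      = [if 65 ≤ c.toNat && c.toNat ≤ 122 then c else 'z'] := by
  by_cases h : c.toNat < 65 ∨ c.toNat > 122 <;> simp [h] <;> omega

-- ===== VERDICT (by name: the statement is the Claim_ definition above) =====
theorem clean_project_name_spec : Claim_equal_clean_project_name := by
  intro name _
  unfold Spec_clean_project_name clean_project_name clean_project_name_alt
  have : ∀ c : Char,
      (fun (acc : List Char) c =>
        if c.toNat < 65 ∨ c.toNat > 122 then acc ++ ['z'] else acc ++ [c])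
      = fun acc c => acc ++ (if c.toNat < 65 ∨ c.toNat > 122 then ['z'] else [c]) := by
    intro c; funext acc c; by_cases h : c.toNat < 65 ∨ c.toNat > 122 <;> simp [h]
  rw [this 'a']
  simp only [clean_pointwise, PySem.List.foldl_append_singleton_eq_map, List.nil_append]
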